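-- pv_equiv track=rewrite | github.com/MAInformatico/Codefights | TheCore/LoopTunnel/Appleboxes.py | appleBoxes
-- ===== SOURCE A (Python) =====
-- def appleBoxes(k):
--     red = 0
--     yellow = 0
--     for i in range(1, k + 1, 2):
--         yellow += i * i
--     for j in range(2, k + 1, 2):
--         red += j * j
--     return red-yellow
-- ===== SOURCE B (Python) =====
-- def appleBoxes(k):
--     # closed form: the alternating sum of squares collapses to a signed triangular number
--     if k < 0:
--         k = 0
--     t = k * (k + 1) // 2
--     return t if k % 2 == 0 else -t
-- ===== Notes on version B (the rewrite author's own statement) =====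
-- stated objective: faster
-- what changed: Replaced the two O(k) parity loops over squares by the closed-form identity: the alternating sum of squares equals a signed triangular number.
import Mathlib
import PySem

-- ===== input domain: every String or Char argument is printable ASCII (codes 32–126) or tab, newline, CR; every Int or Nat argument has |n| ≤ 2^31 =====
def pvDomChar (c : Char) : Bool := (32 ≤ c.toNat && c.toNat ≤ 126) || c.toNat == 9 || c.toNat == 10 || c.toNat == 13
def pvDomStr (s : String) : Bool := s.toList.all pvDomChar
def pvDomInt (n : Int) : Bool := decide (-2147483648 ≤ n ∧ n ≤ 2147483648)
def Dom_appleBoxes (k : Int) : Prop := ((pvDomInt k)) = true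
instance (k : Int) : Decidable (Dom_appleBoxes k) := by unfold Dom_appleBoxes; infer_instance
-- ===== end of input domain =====

-- B replaces A's two linear loops over squares by a closed-form signed triangular number.


-- ===== PORT A =====
def appleBoxes (k : Int) : Int :=
  let yellow := (PySem.List.pyRange 1 (k + 1) 2).foldl (fun y i => y + i * i) 0
  let red := (PySem.List.pyRange 2 (k + 1) 2).foldl (fun r j => r + j * j) 0
  red - yellow

-- ===== PORT B =====
def appleBoxes_alt (k : Int) : Int :=
  let k' := if k < 0 then 0 else k
  let t := PySem.Int.floordiv (k' * (k' + 1)) 2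
  if PySem.Int.mod k' 2 = 0 then t else -t

-- ===== PRECONDITION & SPEC =====
def Spec_appleBoxes (k : Int) (out : Int) : Prop := out = appleBoxes_alt k
instance (k : Int) (out : Int) : Decidable (Spec_appleBoxes k out) := by unfold Spec_appleBoxes; infer_instance

-- ===== CLAIM (what is proved, stated in full; the proofs are below) =====
def Claim_equal_appleBoxes : Prop := ∀ (k : Int), Dom_appleBoxes k → Spec_appleBoxes k (appleBoxes k)

-- ===== LEMMAS AND PROOFS =====

-- A's two loops, seen through pyRange_of_pos, are folds over mapped List.range with these counts.
def pvYellowN (n : Nat) : Int :=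
  ((List.range ((n + 1) / 2)).map (fun j : Nat => (1 : Int) + 2 * (j : Int))).foldl (fun y i => y + i * i) 0
def pvRedN (n : Nat) : Int :=
  ((List.range (n / 2)).map (fun j : Nat => (2 : Int) + 2 * (j : Int))).foldl (fun r j => r + j * j) 0

theorem pv_key (n : Nat) :
    2 * (pvRedN n - pvYellowN n) = (-1 : Int) ^ n * n * (n + 1) := by
  induction n with
  | zero => simp [pvRedN, pvYellowN]
  | succ n ih =>
    rcases Nat.even_or_odd n with ⟨m, hm⟩ | ⟨m, hm⟩
    · -- n = 2m even: yellow gains (1+2m)^2, red stays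
      subst hm
      have c1 : (m + m) / 2 = m := by omega
      have c2 : (m + m + 1) / 2 = m := by omega
      have c3 : (m + m + 1 + 1) / 2 = m + 1 := by omega
      unfold pvRedN pvYellowN at ih ⊢
      rw [c1, c2] at ih
      rw [c2, c3, List.range_succ]
      have he : (-1 : Int) ^ (m + m) = 1 := Even.neg_one_pow ⟨m, rfl⟩
      have ho : (-1 : Int) ^ (m + m + 1) = -1 := by rw [pow_succ, he]; ring
      rw [he] at ih; rw [ho]
      simp only [List.map_append, List.map_cons, List.map_nil, List.foldl_append,
        List.foldl_cons, List.foldl_nil] at ih ⊢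
      push_cast at ih ⊢
      ring_nf at ih ⊢
      linarith [ih]
    · -- n = 2m+1 odd: red gains (2+2m)^2, yellow stays
      subst hm
      have c1 : (2 * m + 1) / 2 = m := by omega
      have c2 : (2 * m + 1 + 1) / 2 = m + 1 := by omega
      have c3 : (2 * m + 1 + 1 + 1) / 2 = m + 1 := by omega
      unfold pvRedN pvYellowN at ih ⊢
      rw [c1, c2, List.range_succ] at ih
      rw [c2, c3, List.range_succ]
      have ho : (-1 : Int) ^ (2 * m + 1) = -1 := Odd.neg_one_pow ⟨m, by omega⟩
      have he : (-1 : Int) ^ (2 * m + 1 + 1) = 1 := by rw [pow_succ, ho]; ring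
      rw [ho] at ih; rw [he]
      simp only [List.map_append, List.map_cons, List.map_nil, List.foldl_append,
        List.foldl_cons, List.foldl_nil] at ih ⊢
      push_cast at ih ⊢
      ring_nf at ih ⊢
      linarith [ih]

theorem pv_yellow_eq (n : Nat) (hn : 0 < n) :
    (PySem.List.pyRange 1 ((n : Int) + 1) 2).foldl (fun y i => y + i * i) 0 = pvYellowN n := by
  rw [PySem.List.pyRange_of_pos 1 ((n : Int) + 1) (by norm_num)]
  have hc : (1 : Int) < (n : Int) + 1 := by exact_mod_cast Nat.succ_lt_succ hn
  have hcount : (((n : Int) + 1 - 1 + 2 - 1) / 2).toNat = (n + 1) / 2 := by omega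
  rw [if_pos hc, hcount]
  rfl

theorem pv_red_eq (n : Nat) (hn : 0 < n) :
    (PySem.List.pyRange 2 ((n : Int) + 1) 2).foldl (fun r j => r + j * j) 0 = pvRedN n := by
  rw [PySem.List.pyRange_of_pos 2 ((n : Int) + 1) (by norm_num)]
  by_cases h1 : 1 < n
  · have hc : (2 : Int) < (n : Int) + 1 := by exact_mod_cast Nat.succ_lt_succ h1
    have hcount : (((n : Int) + 1 - 2 + 2 - 1) / 2).toNat = n / 2 := by omega
    rw [if_pos hc, hcount]
    rfl
  · have hn1 : n = 1 := by omega
    subst hn1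
    rw [if_neg (by norm_num)]
    rfl

-- ===== VERDICT (by name: the statement is the Claim_ definition above) =====
theorem appleBoxes_spec : Claim_equal_appleBoxes := by
  intro k _
  unfold Spec_appleBoxes appleBoxes appleBoxes_alt
  dsimp only
  by_cases hk : k ≤ 0
  · -- both loops run zero times; B: k' = 0
    have hy : PySem.List.pyRange 1 (k + 1) 2 = [] := by
      rw [PySem.List.pyRange_of_pos 1 (k + 1) (by norm_num), if_neg (by omega)]; rfl
    have hr : PySem.List.pyRange 2 (k + 1) 2 = [] := by
      rw [PySem.List.pyRange_of_pos 2 (k + 1) (by norm_num), if_neg (by omega)]; rfl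
    rw [hy, hr]
    have hk' : (if k < 0 then (0 : Int) else k) = 0 := by
      split_ifs with h
      · rfl
      · omega
    rw [hk']
    norm_num [PySem.Int.mod, PySem.Int.floordiv]
  · rw [not_le] at hk
    set n := k.toNat with hn
    have hkn : k = (n : Int) := by omega
    have hn0 : 0 < n := by omega
    rw [hkn, pv_yellow_eq n hn0, pv_red_eq n hn0]
    have hkey := pv_key n
    have hknn : ¬ ((n : Int) < 0) := by omega
    rw [if_neg hknn]
    have hmod : PySem.Int.mod (n : Int) 2 = ((n : Int)) % 2 :=
      PySem.Int.mod_eq_emod_of_pos (by norm_num)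
    have hdiv : PySem.Int.floordiv ((n : Int) * ((n : Int) + 1)) 2
        = ((n : Int) * ((n : Int) + 1)) / 2 :=
      PySem.Int.floordiv_eq_ediv_of_pos (by norm_num)
    rcases Nat.even_or_odd n with he | ho
    · have hp : (-1 : Int) ^ n = 1 := Even.neg_one_pow he
      rw [hp] at hkey
      have hm0 : PySem.Int.mod (n : Int) 2 = 0 := by
        rw [hmod]; obtain ⟨m, hm⟩ := he; omega
      rw [if_pos hm0, hdiv]
      have h2 : 2 * (pvRedN n - pvYellowN n) = (n : Int) * ((n : Int) + 1) := by
        rw [hkey]; ring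
      omega
    · have hp : (-1 : Int) ^ n = -1 := Odd.neg_one_pow ho
      rw [hp] at hkey
      have hm1 : ¬ (PySem.Int.mod (n : Int) 2 = 0) := by
        rw [hmod]; obtain ⟨m, hm⟩ := ho; omega
      rw [if_neg hm1, hdiv]
      have h2 : 2 * (pvRedN n - pvYellowN n) = -((n : Int) * ((n : Int) + 1)) := by
        rw [hkey]; ring
      omega
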